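-- pv_equiv track=rewrite | github.com/daniel-reich/ubiquitous-fiesta | WS6hR6b9EZzuDTD26_23.py | no_duplicate_letters
-- ===== SOURCE A (Python) =====
-- def no_duplicate_letters(phrase):
--   splitted_phrase=phrase.split()
--   for i in splitted_phrase:
--     for j,v in enumerate(sorted(i)):
--       if j==len(sorted(i))-1:break
--       if v==(sorted(i)[j+1]):
--         return False
--   return True
-- ===== SOURCE B (Python) =====
-- def no_duplicate_letters(phrase):
--     for word in phrase.split():
--         seen = set()
--         for ch in word:
--             if ch in seen:
--                 return False
--             seen.add(ch)
--     return True
-- ===== Notes on version B (the rewrite author's own statement) =====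
-- stated objective: simpler
-- what changed: Replaced A's per-word sort (recomputed on every inner-loop iteration) and adjacent-pair comparison with a single incremental seen-set membership scan per word with early exit.
import Mathlib
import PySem

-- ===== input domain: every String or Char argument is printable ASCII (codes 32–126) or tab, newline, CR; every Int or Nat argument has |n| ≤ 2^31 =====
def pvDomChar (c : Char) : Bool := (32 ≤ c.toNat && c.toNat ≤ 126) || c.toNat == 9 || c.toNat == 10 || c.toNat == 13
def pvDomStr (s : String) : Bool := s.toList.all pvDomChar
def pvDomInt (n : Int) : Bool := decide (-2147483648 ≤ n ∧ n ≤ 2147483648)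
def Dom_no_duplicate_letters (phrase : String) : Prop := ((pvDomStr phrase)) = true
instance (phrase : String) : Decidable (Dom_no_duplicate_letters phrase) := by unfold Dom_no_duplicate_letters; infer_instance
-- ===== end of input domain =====

-- B replaces A's repeated per-word sort + adjacent-pair comparison with one incremental
-- seen-set membership scan per word (objective: simpler).

-- ===== PORT A =====
-- inner 'for j,v in enumerate(sorted(i))' loop; returns true iff the Python hits 'return False'
def pvAInner (s : List Char) : List (Int × Char) → Bool
  | [] => false
  | (j, v) :: rest =>
      if j = (s.length : Int) - 1 then false
      else if some v == PySem.List.pyGet? s (j + 1) then true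
      else pvAInner s rest

def no_duplicate_letters (phrase : String) : Bool :=
  let splitted_phrase := PySem.Str.split₀ phrase
  !(splitted_phrase.any (fun i =>
      pvAInner (PySem.List.sorted i.toList (fun c => c) false)
        (PySem.List.enumerate (PySem.List.sorted i.toList (fun c => c) false) 0)))

-- ===== PORT B =====
-- inner 'for ch in word' loop with the seen set; true iff no repeated character found
def pvBWord (seen : PySem.Set Char) : List Char → Bool
  | [] => true
  | c :: cs => if PySem.Set.contains seen c then false else pvBWord (PySem.Set.add seen c) cs

def no_duplicate_letters_alt (phrase : String) : Bool :=
  (PySem.Str.split₀ phrase).all (fun word => pvBWord PySem.Set.empty word.toList)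

-- ===== PRECONDITION & SPEC =====
def Spec_no_duplicate_letters (phrase : String) (out : Bool) : Prop := out = no_duplicate_letters_alt phrase
instance (phrase : String) (out : Bool) : Decidable (Spec_no_duplicate_letters phrase out) := by unfold Spec_no_duplicate_letters; infer_instance

-- ===== CLAIM (what is proved, stated in full; the proofs are below) =====
def Claim_equal_no_duplicate_letters : Prop := ∀ (phrase : String), Dom_no_duplicate_letters phrase → Spec_no_duplicate_letters phrase (no_duplicate_letters phrase)

-- ===== LEMMAS AND PROOFS =====

-- adjacent-duplicate test on a list
def pvAdjDup : List Char → Bool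
  | [] => false
  | [_] => false
  | x :: y :: t => (x == y) || pvAdjDup (y :: t)

theorem pvAInner_enum (s : List Char) : ∀ (suf pre : List Char), s = pre ++ suf →
    pvAInner s (PySem.List.enumerate suf (pre.length : Int)) = pvAdjDup suf := by
  intro suf
  induction suf with
  | nil => intro pre h; simp [PySem.List.enumerate, pvAInner, pvAdjDup]
  | cons v rest ih =>
      intro pre h
      cases rest with
      | nil =>
          subst h
          simp [PySem.List.enumerate_cons, PySem.List.enumerate_nil, pvAInner, pvAdjDup]
      | cons c rest' =>
          have hlen : s.length = pre.length + (rest'.length + 2) := by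
            subst h; simp only [List.length_append, List.length_cons]
          have hne : ((pre.length : Int)) ≠ (s.length : Int) - 1 := by
            rw [hlen]; push_cast; omega
          have hget : PySem.List.pyGet? s ((pre.length : Int) + 1) = some c := by
            have : s = (pre ++ [v]) ++ c :: rest' := by simp [h]
            rw [this]
            have : ((pre.length : Int) + 1) = (((pre ++ [v]).length : Nat) : Int) := by
              simp
            rw [this, PySem.List.pyGet?_append_length]
          have ihx := ih (pre ++ [v]) (by simp [h])
          have harg : (pre.length : Int) + 1 = (((pre ++ [v]).length : Nat) : Int) := by simp
          rw [PySem.List.enumerate_cons]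
          simp only [pvAInner]
          rw [if_neg hne, hget, harg, ihx]
          by_cases hvc : v = c
          · simp [hvc, pvAdjDup]
          · simp [hvc, pvAdjDup]

theorem pvAdjDup_sorted (s : List Char) (hs : s.Pairwise (· ≤ ·)) :
    pvAdjDup s = !decide s.Nodup := by
  induction s with
  | nil => simp [pvAdjDup]
  | cons x t ih =>
      cases t with
      | nil => simp [pvAdjDup]
      | cons y t' =>
          have hs' : (y :: t').Pairwise (· ≤ ·) := hs.tail
          have hxy : x ≤ y := (List.pairwise_cons.1 hs).1 y (by simp)
          by_cases hxyeq : x = y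
          · subst hxyeq
            simp [pvAdjDup, List.nodup_cons]
          · have hx_notmem : x ∉ y :: t' := by
              intro hmem
              rcases List.mem_cons.1 hmem with h1 | h2
              · exact hxyeq h1
              · have hyx : y ≤ x := (List.pairwise_cons.1 hs').1 x h2
                exact hxyeq (le_antisymm hxy hyx)
            have : pvAdjDup (x :: y :: t') = pvAdjDup (y :: t') := by
              simp [pvAdjDup, hxyeq]
            rw [this, ih hs']
            simp [List.nodup_cons, hx_notmem]

theorem pvBWord_iff : ∀ (cs : List Char) (seen : List Char),
    pvBWord seen cs = true ↔ cs.Nodup ∧ ∀ c ∈ cs, c ∉ seen := by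
  intro cs
  induction cs with
  | nil => intro seen; simp [pvBWord]
  | cons c cs ih =>
      intro seen
      by_cases hmem : c ∈ seen
      · have : PySem.Set.contains seen c = true := (PySem.Set.contains_iff seen c).2 hmem
        simp only [pvBWord, this, if_true]
        constructor
        · intro h; exact absurd h (by simp)
        · rintro ⟨_, hall⟩; exact absurd hmem (hall c (by simp))
      · have : PySem.Set.contains seen c = false := by
          by_contra h
          exact hmem ((PySem.Set.contains_iff seen c).1 (by simpa using h))
        simp only [pvBWord, this, Bool.false_eq_true, if_false]
        rw [ih]
        constructor
        · rintro ⟨hnd, hall⟩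
          refine ⟨List.nodup_cons.2 ⟨?_, hnd⟩, ?_⟩
          · intro hc
            have := hall c hc
            simp [PySem.Set.mem_add] at this
          · intro x hx
            rcases List.mem_cons.1 hx with rfl | hx'
            · exact hmem
            · intro hxs
              exact (hall x hx') (by simp [PySem.Set.mem_add, hxs])
        · rintro ⟨hnd, hall⟩
          have hnd' := List.nodup_cons.1 hnd
          refine ⟨hnd'.2, ?_⟩
          intro x hx hxadd
          rcases (PySem.Set.mem_add seen c x).1 hxadd with hxs | rfl
          · exact (hall x (by simp [hx])) hxs
          · exact hnd'.1 hx

theorem pvWord_eq (w : String) :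
    pvAInner (PySem.List.sorted w.toList (fun c => c) false)
      (PySem.List.enumerate (PySem.List.sorted w.toList (fun c => c) false) 0)
      = !(pvBWord PySem.Set.empty w.toList) := by
  set s := PySem.List.sorted w.toList (fun c => c) false with hsdef
  have h1 : pvAInner s (PySem.List.enumerate s (( ([] : List Char).length : Nat) : Int)) = pvAdjDup s :=
    pvAInner_enum s s [] (by simp)
  have h1' : pvAInner s (PySem.List.enumerate s 0) = pvAdjDup s := by simpa using h1
  have hsorted : s.Pairwise (· ≤ ·) := by
    simpa using PySem.List.sorted_pairwise (xs := w.toList) (key := fun c => c)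
  have hperm : s.Perm w.toList := PySem.List.sorted_perm w.toList (fun c => c) false
  have h2 : pvAdjDup s = !decide s.Nodup := pvAdjDup_sorted s hsorted
  have h3 : s.Nodup ↔ w.toList.Nodup := hperm.nodup_iff
  have h4 : pvBWord PySem.Set.empty w.toList = decide w.toList.Nodup := by
    by_cases hnd : w.toList.Nodup
    · simp only [hnd, decide_true]
      exact (pvBWord_iff w.toList []).2 ⟨hnd, by simp⟩
    · simp only [hnd, decide_false]
      by_contra h
      have := (pvBWord_iff w.toList []).1 (by simpa using h)
      exact hnd this.1
    -- PySem.Set.empty is []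
  rw [h1', h2, h4]
  by_cases hnd : w.toList.Nodup
  · simp [hnd, h3.2 hnd]
  · have : ¬ s.Nodup := fun h => hnd (h3.1 h)
    simp [hnd, this]

-- ===== VERDICT (by name: the statement is the Claim_ definition above) =====
theorem no_duplicate_letters_spec : Claim_equal_no_duplicate_letters := by
  intro phrase _
  unfold Spec_no_duplicate_letters no_duplicate_letters no_duplicate_letters_alt
  simp only [pvWord_eq]
  induction PySem.Str.split₀ phrase with
  | nil => simp
  | cons w ws ih =>
      simp only [PySem.Set.empty] at ih ⊢
      simp only [List.any_cons, List.all_cons, Bool.not_or, Bool.not_not]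
      rw [ih]
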